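-- pv_equiv track=rewrite | github.com/Casualrobin/youtube-playlist | src/OutputManager.py | add_titles_inline
-- ===== SOURCE A (Python) =====
-- def add_titles_inline(input_list):
--     new_list = []
--     it = iter(input_list)
--     for a, b, c in zip(it, it, it):
--         a = 'Song: ' + a
--         b = 'Link: ' + b
--         c = 'Artist / Video Channel: ' + c
--         new_list.append(a)
--         new_list.append(b)
--         new_list.append(c)
--     return new_list
-- ===== SOURCE B (Python) =====
-- def add_titles_inline(input_list):
--     items = list(input_list)
--     prefixes = ['Song: ', 'Link: ', 'Artist / Video Channel: ']
--     n = len(items) - len(items) % 3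
--     return [prefixes[i % 3] + items[i] for i in range(n)]
-- ===== Notes on version B (the rewrite author's own statement) =====
-- stated objective: idiomatic
-- what changed: Replaces the zip-of-one-iterator triple-grouping loop with a single flat comprehension over modular indices into a prefix table, truncating to a multiple of 3 up front.
import Mathlib
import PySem

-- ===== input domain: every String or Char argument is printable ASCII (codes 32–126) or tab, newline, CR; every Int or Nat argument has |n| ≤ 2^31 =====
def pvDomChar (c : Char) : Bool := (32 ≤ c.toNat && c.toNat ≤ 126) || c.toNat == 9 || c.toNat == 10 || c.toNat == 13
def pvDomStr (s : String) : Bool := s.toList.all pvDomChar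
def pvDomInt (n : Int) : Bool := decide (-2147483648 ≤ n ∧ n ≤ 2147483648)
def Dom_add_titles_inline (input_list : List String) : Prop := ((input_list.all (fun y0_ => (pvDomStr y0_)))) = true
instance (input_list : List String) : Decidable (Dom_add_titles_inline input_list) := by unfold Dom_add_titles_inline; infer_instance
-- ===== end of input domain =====

-- B replaces A's zip-of-one-iterator triple loop by one modular-indexed comprehension over a prefix table (idiomatic; same cost).

-- ===== PORT A =====
-- zip(it, it, it) consumes the list three at a time; each iteration appends the three labelled items.
def add_titles_inline (input_list : List String) : List String :=
  match input_list with
  | a :: b :: c :: rest =>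
      ("Song: " ++ a) :: ("Link: " ++ b) :: ("Artist / Video Channel: " ++ c)
        :: add_titles_inline rest
  | _ => []

-- ===== PORT B =====
def pvPrefixes : List String := ["Song: ", "Link: ", "Artist / Video Channel: "]

def add_titles_inline_alt (input_list : List String) : List String :=
  let items := input_list
  let n := items.length - items.length % 3
  (List.range n).map (fun i => pvPrefixes.getD (i % 3) "" ++ items.getD i "")

-- ===== PRECONDITION & SPEC =====
def Spec_add_titles_inline (input_list : List String) (out : List String) : Prop := out = add_titles_inline_alt input_list
instance (input_list : List String) (out : List String) : Decidable (Spec_add_titles_inline input_list out) := by unfold Spec_add_titles_inline; infer_instance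

-- ===== CLAIM (what is proved, stated in full; the proofs are below) =====
def Claim_equal_add_titles_inline : Prop := ∀ (input_list : List String), Dom_add_titles_inline input_list → Spec_add_titles_inline input_list (add_titles_inline input_list)

-- ===== LEMMAS AND PROOFS =====
theorem alt_eq_a (xs : List String) : add_titles_inline_alt xs = add_titles_inline xs := by
  unfold add_titles_inline_alt
  simp only []
  induction xs using add_titles_inline.induct with
  | case1 a b c rest ih =>
      have hlen : (a :: b :: c :: rest).length - (a :: b :: c :: rest).length % 3
          = 3 + (rest.length - rest.length % 3) := by
        simp [List.length_cons]
        omega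
      rw [hlen, List.range_add, List.map_append]
      rw [show add_titles_inline (a :: b :: c :: rest)
            = ("Song: " ++ a) :: ("Link: " ++ b) :: ("Artist / Video Channel: " ++ c)
              :: add_titles_inline rest from rfl]
      rw [← ih]
      simp [List.range_succ_eq_map, List.map_map, Function.comp, pvPrefixes,
            Nat.add_mod_left, List.getD]
      intro i hi
      simp [List.getElem?_cons]
  | case2 xs h1 =>
      rcases xs with _ | ⟨a, _ | ⟨b, _ | ⟨c, rest⟩⟩⟩
      · simp [add_titles_inline]
      · simp [add_titles_inline]
      · simp [add_titles_inline]
      · exact absurd rfl (h1 a b c rest)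

-- ===== VERDICT (by name: the statement is the Claim_ definition above) =====
theorem add_titles_inline_spec : Claim_equal_add_titles_inline := by
  intro xs _
  unfold Spec_add_titles_inline
  exact (alt_eq_a xs).symm
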